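-- pv_equiv track=rewrite | github.com/fpeterek/SPR-Solutions | 10160.py | by_occurrences
-- ===== SOURCE A (Python) =====
-- def by_occurrences(towns, sets):
--     occurrs_in = dict()
--     for town in towns:
--         for s in sets.values():
--             if town in s:
--                 if town not in occurrs_in:
--                     occurrs_in[town] = [s]
--                 else:
--                     occurrs_in[town].append(s)
--     return occurrs_in
-- ===== SOURCE B (Python) =====
-- def by_occurrences(towns, sets):
--     # Inverted index: one pass over the sets' elements instead of a
--     # membership scan of every set for every town.
--     townset = set(towns)
--     index = {}
--     for s in sets.values():
--         seen = set()
--         for e in s: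
--             if e in townset and e not in seen:
--                 seen.add(e)
--                 index.setdefault(e, []).append(s)
--     out = {}
--     for town in towns:
--         if town in index:
--             out.setdefault(town, []).extend(index[town])
--     return out
-- ===== Notes on version B (the rewrite author's own statement) =====
-- stated objective: faster
-- what changed: Instead of scanning every set for every town (a membership scan per town/set pair), B builds an inverted index element->containing-sets in one pass over the sets' elements and then assembles the result by a single pass over towns.
import Mathlib
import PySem

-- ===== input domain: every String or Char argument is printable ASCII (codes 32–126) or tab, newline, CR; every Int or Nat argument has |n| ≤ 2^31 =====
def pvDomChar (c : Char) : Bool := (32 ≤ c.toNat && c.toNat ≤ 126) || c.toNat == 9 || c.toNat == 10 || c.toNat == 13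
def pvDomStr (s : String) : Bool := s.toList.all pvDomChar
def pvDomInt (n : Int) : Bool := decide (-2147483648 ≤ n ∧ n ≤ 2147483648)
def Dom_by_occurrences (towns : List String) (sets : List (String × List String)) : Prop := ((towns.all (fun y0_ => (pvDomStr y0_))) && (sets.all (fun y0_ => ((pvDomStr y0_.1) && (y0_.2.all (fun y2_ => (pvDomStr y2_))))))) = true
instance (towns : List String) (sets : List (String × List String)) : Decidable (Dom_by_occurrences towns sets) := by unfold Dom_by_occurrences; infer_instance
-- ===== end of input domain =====

-- B replaces A's per-town membership scan of every set with an inverted index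
-- built in one pass over the sets' elements (objective: faster).

-- ===== PORT A =====
def by_occurrences (towns : List String) (sets : List (String × List String)) : List (String × List (List String)) :=
  (towns.foldl (fun d town =>
      (PySem.Dict.ofList sets).values.foldl (fun d s =>
        if town ∈ s then
          if d.contains town = false then d.insert town [s]
          else d.modify town [] (fun l => l ++ [s])
        else d) d)
    PySem.Dict.empty).items

-- ===== PORT B =====
def by_occurrences_alt (towns : List String) (sets : List (String × List String)) : List (String × List (List String)) :=
  let townset : PySem.Set String := PySem.Set.ofList towns
  let index : PySem.Dict String (List (List String)) :=
    (PySem.Dict.ofList sets).values.foldl (fun idx s =>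
      (s.foldl (fun (p : PySem.Dict String (List (List String)) × PySem.Set String) e =>
          if e ∈ townset ∧ e ∉ p.2 then
            (p.1.modify e [] (fun l => l ++ [s]), PySem.Set.add p.2 e)
          else p)
        (idx, PySem.Set.empty)).1)
      PySem.Dict.empty
  (towns.foldl (fun out town =>
      if index.contains town = true then
        out.modify town [] (fun l => l ++ index.getD town [])
      else out)
    PySem.Dict.empty).items

-- ===== PRECONDITION & SPEC =====
def Spec_by_occurrences (towns : List String) (sets : List (String × List String)) (out : List (String × List (List String))) : Prop := out = by_occurrences_alt towns sets
instance (towns : List String) (sets : List (String × List String)) (out : List (String × List (List String))) : Decidable (Spec_by_occurrences towns sets out) := by unfold Spec_by_occurrences; infer_instance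

-- ===== CLAIM (what is proved, stated in full; the proofs are below) =====
def Claim_equal_by_occurrences : Prop := ∀ (towns : List String) (sets : List (String × List String)), Dom_by_occurrences towns sets → Spec_by_occurrences towns sets (by_occurrences towns sets)

-- ===== LEMMAS AND PROOFS =====

theorem pv_modify_eq_insert {κ ν : Type} [BEq κ] (d : PySem.Dict κ (List ν)) (k : κ) (f : List ν → List ν) :
    d.modify k [] f = d.insert k (f (d.getD k [])) := rfl

theorem pv_get?_modify {κ ν : Type} [DecidableEq κ] [BEq κ] [LawfulBEq κ]
    (d : PySem.Dict κ (List ν)) (k k' : κ) (f : List ν → List ν) :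
    (d.modify k [] f).get? k' = if k' = k then some (f (d.getD k [])) else d.get? k' := by
  rw [pv_modify_eq_insert, PySem.Dict.get?_insert]

theorem pv_modify_modify {κ ν : Type} [BEq κ] [LawfulBEq κ]
    (d : PySem.Dict κ (List ν)) (k : κ) (xs ys : List ν) :
    ((d.modify k [] (fun l => l ++ xs)).modify k [] (fun l => l ++ ys))
      = d.modify k [] (fun l => l ++ (xs ++ ys)) := by
  rw [pv_modify_eq_insert, pv_modify_eq_insert, pv_modify_eq_insert,
      PySem.Dict.getD_insert_self, PySem.Dict.insert_insert_self, List.append_assoc]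

theorem pv_lemA (t : String) (l : List (List String)) (d : PySem.Dict String (List (List String))) :
    l.foldl (fun d s =>
        if t ∈ s then
          if d.contains t = false then d.insert t [s]
          else d.modify t [] (fun l => l ++ [s])
        else d) d
      = if l.filter (fun s => decide (t ∈ s)) = [] then d
        else d.modify t [] (fun v => v ++ l.filter (fun s => decide (t ∈ s))) := by
  induction l generalizing d with
  | nil => simp
  | cons s l ih =>
    by_cases hs : t ∈ s
    · have hstep : (if t ∈ s then
          if d.contains t = false then d.insert t [s]
          else d.modify t [] (fun l => l ++ [s]) else d) = d.modify t [] (fun l => l ++ [s]) := by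
        rw [if_pos hs]
        by_cases hc : d.contains t = true
        · simp [hc]
        · have hc' : d.contains t = false := by simpa using hc
          rw [if_pos hc', pv_modify_eq_insert, PySem.Dict.getD_of_not_contains _ _ hc']; rfl
      rw [List.foldl_cons, hstep, ih]
      have hfc : (s :: l).filter (fun s => decide (t ∈ s)) = s :: l.filter (fun s => decide (t ∈ s)) := by
        simp [hs]
      rw [hfc]
      by_cases hf : l.filter (fun s => decide (t ∈ s)) = []
      · simp [hf]
      · rw [if_neg hf, if_neg (by simp), pv_modify_modify]
        simp
    · have hfc : (s :: l).filter (fun s => decide (t ∈ s)) = l.filter (fun s => decide (t ∈ s)) := by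
        simp [hs]
      rw [List.foldl_cons, if_neg hs, ih, hfc]

theorem pv_lemB_set (townset : PySem.Set String) (s : List String) (t : String)
    (elems : List String) (idx : PySem.Dict String (List (List String))) (seen : PySem.Set String) :
    ((elems.foldl (fun (p : PySem.Dict String (List (List String)) × PySem.Set String) e =>
        if e ∈ townset ∧ e ∉ p.2 then
          (p.1.modify e [] (fun l => l ++ [s]), PySem.Set.add p.2 e)
        else p) (idx, seen)).1).get? t
      = if t ∈ townset ∧ t ∈ elems ∧ t ∉ seen then some (idx.getD t [] ++ [s]) else idx.get? t := by
  induction elems generalizing idx seen with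
  | nil => simp
  | cons e elems ih =>
    rw [List.foldl_cons]
    by_cases hcond : e ∈ townset ∧ e ∉ seen
    · rw [if_pos hcond, ih]
      by_cases hte : t = e
      · subst hte
        rw [if_neg (fun h => h.2.2 (by rw [PySem.Set.mem_add]; right; rfl))]
        rw [pv_get?_modify, if_pos rfl]
        rw [if_pos ⟨hcond.1, List.mem_cons_self, hcond.2⟩]
      · have hgd : (idx.modify e [] (fun l => l ++ [s])).getD t [] = idx.getD t [] := by
          rw [PySem.Dict.getD_eq_get?_getD, pv_get?_modify, if_neg hte, ← PySem.Dict.getD_eq_get?_getD]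
        have hmem : (t ∈ PySem.Set.add seen e) ↔ t ∈ seen := by
          rw [PySem.Set.mem_add]; exact or_iff_left hte
        have hmc : (t ∈ e :: elems) ↔ t ∈ elems := by simp [hte]
        simp only [hmem, hmc, hgd, pv_get?_modify, if_neg hte]
    · rw [if_neg hcond, ih]
      by_cases hte : t = e
      · subst hte
        by_cases h1 : t ∈ townset ∧ t ∈ elems ∧ t ∉ seen
        · exact absurd ⟨h1.1, h1.2.2⟩ hcond
        · rw [if_neg h1, if_neg (fun h => hcond ⟨h.1, h.2.2⟩)]
      · have hmc : (t ∈ e :: elems) ↔ t ∈ elems := by simp [hte]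
        simp only [hmc]

theorem pv_lemB_index (townset : PySem.Set String) (t : String)
    (vals : List (List String)) (idx : PySem.Dict String (List (List String))) :
    (vals.foldl (fun idx s =>
        (s.foldl (fun (p : PySem.Dict String (List (List String)) × PySem.Set String) e =>
            if e ∈ townset ∧ e ∉ p.2 then
              (p.1.modify e [] (fun l => l ++ [s]), PySem.Set.add p.2 e)
            else p)
          (idx, PySem.Set.empty)).1) idx).get? t
      = if t ∈ townset ∧ vals.filter (fun s => decide (t ∈ s)) ≠ [] then
          some (idx.getD t [] ++ vals.filter (fun s => decide (t ∈ s)))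
        else idx.get? t := by
  induction vals generalizing idx with
  | nil => simp
  | cons s vals ih =>
    rw [List.foldl_cons, ih]
    have hempty : t ∉ (PySem.Set.empty : PySem.Set String) := by simp [PySem.Set.empty]
    have hset := pv_lemB_set townset s t s idx PySem.Set.empty
    by_cases hts : t ∈ townset
    · by_cases hs : t ∈ s
      · have hget : ((s.foldl (fun (p : PySem.Dict String (List (List String)) × PySem.Set String) e =>
            if e ∈ townset ∧ e ∉ p.2 then
              (p.1.modify e [] (fun l => l ++ [s]), PySem.Set.add p.2 e)
            else p) (idx, PySem.Set.empty)).1).get? t = some (idx.getD t [] ++ [s]) := by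
          rw [hset, if_pos ⟨hts, hs, hempty⟩]
        have hgd : ((s.foldl (fun (p : PySem.Dict String (List (List String)) × PySem.Set String) e =>
            if e ∈ townset ∧ e ∉ p.2 then
              (p.1.modify e [] (fun l => l ++ [s]), PySem.Set.add p.2 e)
            else p) (idx, PySem.Set.empty)).1).getD t [] = idx.getD t [] ++ [s] := by
          rw [PySem.Dict.getD_eq_get?_getD, hget]; rfl
        simp only [PySem.Set.empty] at hget hgd
        by_cases hf : vals.filter (fun s => decide (t ∈ s)) = []
        · simp [hf, hget, hts, hs]
        · simp [hf, hgd, hts, hs]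
      · have heq : ((s.foldl (fun (p : PySem.Dict String (List (List String)) × PySem.Set String) e =>
            if e ∈ townset ∧ e ∉ p.2 then
              (p.1.modify e [] (fun l => l ++ [s]), PySem.Set.add p.2 e)
            else p) (idx, PySem.Set.empty)).1).get? t = idx.get? t := by
          rw [hset, if_neg (fun h => hs h.2.1)]
        have hgd : ((s.foldl (fun (p : PySem.Dict String (List (List String)) × PySem.Set String) e =>
            if e ∈ townset ∧ e ∉ p.2 then
              (p.1.modify e [] (fun l => l ++ [s]), PySem.Set.add p.2 e)
            else p) (idx, PySem.Set.empty)).1).getD t [] = idx.getD t [] := by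
          rw [PySem.Dict.getD_eq_get?_getD, heq, ← PySem.Dict.getD_eq_get?_getD]
        simp only [PySem.Set.empty] at heq hgd
        simp [heq, hgd, hs]
    · have heq : ((s.foldl (fun (p : PySem.Dict String (List (List String)) × PySem.Set String) e =>
            if e ∈ townset ∧ e ∉ p.2 then
              (p.1.modify e [] (fun l => l ++ [s]), PySem.Set.add p.2 e)
            else p) (idx, PySem.Set.empty)).1).get? t = idx.get? t := by
        rw [hset, if_neg (fun h => hts h.1)]
      simp only [PySem.Set.empty] at heq
      simp [heq, hts]

theorem pv_main (towns : List String) (sets : List (String × List String)) :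
    by_occurrences towns sets = by_occurrences_alt towns sets := by
  unfold by_occurrences by_occurrences_alt
  apply congrArg PySem.Dict.items
  apply PySem.List.foldl_congr_mem'
  intro town htown d
  rw [pv_lemA]
  have hidx := pv_lemB_index (PySem.Set.ofList towns) town
      ((PySem.Dict.ofList sets).values) PySem.Dict.empty
  have hts : town ∈ PySem.Set.ofList towns := (PySem.Set.mem_ofList _ _).mpr htown
  by_cases hf : ((PySem.Dict.ofList sets).values).filter (fun s => decide (town ∈ s)) = []
  · rw [if_pos hf]
    have hnone : (((PySem.Dict.ofList sets).values.foldl (fun idx s =>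
        (s.foldl (fun (p : PySem.Dict String (List (List String)) × PySem.Set String) e =>
            if e ∈ PySem.Set.ofList towns ∧ e ∉ p.2 then
              (p.1.modify e [] (fun l => l ++ [s]), PySem.Set.add p.2 e)
            else p)
          (idx, PySem.Set.empty)).1) PySem.Dict.empty)).get? town = none := by
      rw [hidx, if_neg (fun h => h.2 hf)]; exact PySem.Dict.get?_empty _
    have hc : (((PySem.Dict.ofList sets).values.foldl (fun idx s =>
        (s.foldl (fun (p : PySem.Dict String (List (List String)) × PySem.Set String) e =>
            if e ∈ PySem.Set.ofList towns ∧ e ∉ p.2 then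
              (p.1.modify e [] (fun l => l ++ [s]), PySem.Set.add p.2 e)
            else p)
          (idx, PySem.Set.empty)).1) PySem.Dict.empty)).contains town = false := by
      rw [PySem.Dict.contains_eq_isSome_get?, hnone]; rfl
    rw [if_neg (fun h => absurd hc (by rw [h]; simp))]
  · rw [if_neg hf]
    have hsome : (((PySem.Dict.ofList sets).values.foldl (fun idx s =>
        (s.foldl (fun (p : PySem.Dict String (List (List String)) × PySem.Set String) e =>
            if e ∈ PySem.Set.ofList towns ∧ e ∉ p.2 then
              (p.1.modify e [] (fun l => l ++ [s]), PySem.Set.add p.2 e)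
            else p)
          (idx, PySem.Set.empty)).1) PySem.Dict.empty)).get? town
        = some (((PySem.Dict.ofList sets).values).filter (fun s => decide (town ∈ s))) := by
      rw [hidx, if_pos ⟨hts, hf⟩]
      simp
    have hc : (((PySem.Dict.ofList sets).values.foldl (fun idx s =>
        (s.foldl (fun (p : PySem.Dict String (List (List String)) × PySem.Set String) e =>
            if e ∈ PySem.Set.ofList towns ∧ e ∉ p.2 then
              (p.1.modify e [] (fun l => l ++ [s]), PySem.Set.add p.2 e)
            else p)
          (idx, PySem.Set.empty)).1) PySem.Dict.empty)).contains town = true := by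
      rw [PySem.Dict.contains_eq_isSome_get?, hsome]; rfl
    rw [if_pos hc, PySem.Dict.getD_eq_get?_getD, hsome]
    rfl

-- ===== VERDICT (by name: the statement is the Claim_ definition above) =====
theorem by_occurrences_spec : Claim_equal_by_occurrences := by
  intro towns sets _
  unfold Spec_by_occurrences
  exact pv_main towns sets
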